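-- pv_equiv track=rewrite | github.com/liskos/leletko | ege23/99.py | f
-- ===== SOURCE A (Python) =====
-- def f(a, b):
--     if a == 29:
--         return 0
--     if a == b:
--         return 1
--     if a > b:
--         return 0
--     return f(a+1, b) + f(a*3, b) + f(a*2, b)
-- ===== SOURCE B (Python) =====
-- def f(a, b):
--     if a == 29:
--         return 0
--     if a == b:
--         return 1
--     if a > b:
--         return 0
--     n = b - a + 1
--     dp = [0] * n
--     for i in range(n - 1, -1, -1):
--         x = a + i
--         if x == 29:
--             dp[i] = 0
--         elif x == b:
--             dp[i] = 1
--         else: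
--             dp[i] = (dp[i + 1]
--                      + (dp[x * 3 - a] if x * 3 <= b else 0)
--                      + (dp[x * 2 - a] if x * 2 <= b else 0))
--     return dp[0]
-- ===== Notes on version B (the rewrite author's own statement) =====
-- stated objective: faster
-- what changed: Replaced A's exponential three-way recursion by a single descending bottom-up DP pass that fills a dict of counts from b down to a and reads off dp[a].
import Mathlib
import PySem

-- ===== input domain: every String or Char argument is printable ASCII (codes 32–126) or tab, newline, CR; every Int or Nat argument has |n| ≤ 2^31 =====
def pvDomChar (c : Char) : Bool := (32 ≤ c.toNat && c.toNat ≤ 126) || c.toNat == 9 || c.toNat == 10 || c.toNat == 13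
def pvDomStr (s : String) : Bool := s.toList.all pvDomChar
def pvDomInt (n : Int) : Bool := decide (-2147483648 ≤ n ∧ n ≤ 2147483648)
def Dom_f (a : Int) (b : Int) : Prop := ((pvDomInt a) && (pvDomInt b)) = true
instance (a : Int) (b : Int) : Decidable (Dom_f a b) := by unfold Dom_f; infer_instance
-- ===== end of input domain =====

-- B replaces A's exponential three-way recursion by a single descending dict-DP pass, O(b-a);
-- equivalence is about return values on inputs where A's recursion terminates (Pre_f).

-- ===== PORT A =====
-- A's recursion diverges for a ≤ 0 < b - a; fuel (b-a).toNat + 1 suffices exactly on Pre_f,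
-- where the transliterated body below is followed step for step.
def fAux : Nat → Int → Int → Int
  | 0, _, _ => 0
  | n+1, a, b =>
    if a = 29 then 0
    else if a = b then 1
    else if a > b then 0
    else fAux n (a+1) b + fAux n (a*3) b + fAux n (a*2) b

def f (a : Int) (b : Int) : Int := fAux ((b - a).toNat + 1) a b

-- ===== PORT B =====
-- Source B's list indexing ported with Array setIfInBounds/getD and Int.toNat: on every input
-- admitted by Pre_f each index Source B uses is nonnegative and in range, where this is exact.
def fStep (a : Int) (b : Int) (dp : Array Int) (i : Int) : Array Int :=
  if a + i = 29 then dp.setIfInBounds i.toNat 0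
  else if a + i = b then dp.setIfInBounds i.toNat 1
  else dp.setIfInBounds i.toNat
    (dp.getD (i + 1).toNat 0
      + (if (a + i) * 3 ≤ b then dp.getD ((a + i) * 3 - a).toNat 0 else 0)
      + (if (a + i) * 2 ≤ b then dp.getD ((a + i) * 2 - a).toNat 0 else 0))

def f_alt (a : Int) (b : Int) : Int :=
  if a = 29 then 0
  else if a = b then 1
  else if a > b then 0
  else ((PySem.List.pyRange (b - a + 1 - 1) (-1) (-1)).foldl (fStep a b)
          (Array.replicate (b - a + 1).toNat 0)).getD 0 0

-- ===== PRECONDITION & SPEC =====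
-- Pre_f excludes exactly the inputs (a ≤ 0 and a < b) on which A's recursion never
-- terminates (Python raises RecursionError); A returns on every input admitted here.
def Pre_f (a : Int) (b : Int) : Prop := 1 ≤ a ∨ b ≤ a
instance (a : Int) (b : Int) : Decidable (Pre_f a b) := by unfold Pre_f; infer_instance
def pvWitness_f : Int × Int := (1, 6)

def Spec_f (a : Int) (b : Int) (out : Int) : Prop := out = f_alt a b
instance (a : Int) (b : Int) (out : Int) : Decidable (Spec_f a b out) := by unfold Spec_f; infer_instance

-- ===== CLAIM (what is proved, stated in full; the proofs are below) =====
def Claim_equal_f : Prop := ∀ (a : Int) (b : Int), Dom_f a b → Pre_f a b → Spec_f a b (f a b)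

-- ===== LEMMAS AND PROOFS =====

theorem fAux_succ (n : Nat) (a b : Int) : fAux (n+1) a b =
    (if a = 29 then 0
     else if a = b then 1
     else if a > b then 0
     else fAux n (a+1) b + fAux n (a*3) b + fAux n (a*2) b) := rfl

-- fuel irrelevance of A's port, for 1 ≤ a and enough fuel
theorem fAux_congr (b : Int) : ∀ (n₁ n₂ : Nat) (a : Int), 1 ≤ a →
    (b - a).toNat < n₁ → (b - a).toNat < n₂ → fAux n₁ a b = fAux n₂ a b := by
  intro n₁
  induction n₁ with
  | zero => intro n₂ a _ h1 _; omega
  | succ k ih =>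
    intro n₂ a ha h1 h2
    cases n₂ with
    | zero => omega
    | succ j =>
      rw [fAux_succ, fAux_succ]
      split_ifs with h29 heq hgt
      · rfl
      · rfl
      · rfl
      · rw [ih j (a+1) (by omega) (by omega) (by omega),
            ih j (a*3) (by omega) (by omega) (by omega),
            ih j (a*2) (by omega) (by omega) (by omega)]

theorem f_gt (k b : Int) (h : b < k) : f k b = 0 := by
  rw [f, fAux_succ]
  split_ifs <;> first | rfl | omega

theorem f_29 (b : Int) : f 29 b = 0 := by
  rw [f, fAux_succ]
  norm_num

theorem f_self (a : Int) (h : a ≠ 29) : f a a = 1 := by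
  rw [f, fAux_succ]
  split_ifs <;> omega

theorem f_unfold (a b : Int) (ha : 1 ≤ a) (hab : a < b) (h29 : a ≠ 29) :
    f a b = f (a+1) b + f (a*3) b + f (a*2) b := by
  have hm : (b - a).toNat + 1 = ((b - a).toNat - 1) + 1 + 1 := by omega
  conv_lhs => rw [f, hm]
  rw [fAux_succ]
  split_ifs with g29 geq ggt
  · exact absurd g29 h29
  · omega
  · omega
  · rw [fAux_congr b _ ((b - (a+1)).toNat + 1) (a+1) (by omega) (by omega) (by omega),
        fAux_congr b _ ((b - (a*3)).toNat + 1) (a*3) (by omega) (by omega) (by omega),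
        fAux_congr b _ ((b - (a*2)).toNat + 1) (a*2) (by omega) (by omega) (by omega)]
    rfl

-- splitting the countdown range at its last element
theorem pyRange_countdown_snoc (b x : Int) (h1 : x ≤ b) :
    PySem.List.pyRange b (x-1) (-1) = PySem.List.pyRange b x (-1) ++ [x] := by
  rw [PySem.List.pyRange_neg_one_eq_reverse, PySem.List.pyRange_neg_one_eq_reverse]
  have hx : x - 1 + 1 = x := by omega
  rw [hx, PySem.List.pyRange_one_cons (by omega), List.reverse_cons]


-- total forms of Source B's array reads/writes
theorem getD_replicate (m : Nat) (j : Nat) : (Array.replicate m (0:Int)).getD j 0 = 0 := by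
  rw [Array.getD_eq_getD_getElem?, Array.getElem?_replicate]
  split_ifs <;> rfl

theorem getD_setIfInBounds (dp : Array Int) (k : Nat) (v : Int) (j : Nat) (hk : k < dp.size) :
    (dp.setIfInBounds k v).getD j 0 = if k = j then v else dp.getD j 0 := by
  rw [Array.getD_eq_getD_getElem?, Array.getElem?_setIfInBounds]
  by_cases h1 : k = j
  · rw [if_pos h1, if_pos hk, if_pos h1]
    rfl
  · rw [if_neg h1, ← Array.getD_eq_getD_getElem?, if_neg h1]

-- loop invariant: after processing indices n-1, …, i0 the table holds f (a+j) b at every j ≥ i0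
theorem loop_inv (a b : Int) (ha : 1 ≤ a) (hab : a < b) :
    ∀ (m : Nat) (i0 : Int), (b - a + 1 - i0).toNat = m → 0 ≤ i0 → i0 ≤ b - a + 1 →
    ((PySem.List.pyRange (b - a) (i0 - 1) (-1)).foldl (fStep a b)
        (Array.replicate (b - a + 1).toNat 0)).size = (b - a + 1).toNat ∧
    ∀ j : Int, 0 ≤ j → j ≤ b - a →
      ((PySem.List.pyRange (b - a) (i0 - 1) (-1)).foldl (fStep a b)
          (Array.replicate (b - a + 1).toNat 0)).getD j.toNat 0
        = if i0 ≤ j then f (a + j) b else 0 := by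
  intro m
  induction m with
  | zero =>
    intro i0 hm h0 h1
    have hi : i0 = b - a + 1 := by omega
    subst hi
    rw [show b - a + 1 - 1 = b - a by ring, PySem.List.pyRange_neg_one_eq_nil (by omega)]
    refine ⟨by simp [List.foldl_nil], ?_⟩
    intro j hj0 hj1
    rw [List.foldl_nil, getD_replicate]
    rw [if_neg (by omega)]
  | succ m ih =>
    intro i0 hm h0 h1
    have hi0 : i0 ≤ b - a := by omega
    rw [pyRange_countdown_snoc (b - a) i0 hi0, List.foldl_append, List.foldl_cons,
        List.foldl_nil]
    have hrw : PySem.List.pyRange (b - a) i0 (-1)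
        = PySem.List.pyRange (b - a) ((i0 + 1) - 1) (-1) := by norm_num
    rw [hrw]
    obtain ⟨hsz, hd⟩ := ih (i0 + 1) (by omega) (by omega) (by omega)
    set D := (PySem.List.pyRange (b - a) ((i0 + 1) - 1) (-1)).foldl (fStep a b)
        (Array.replicate (b - a + 1).toNat 0) with hD
    have hlt : i0.toNat < D.size := by rw [hsz]; omega
    have hstep : ∃ v, fStep a b D i0 = D.setIfInBounds i0.toNat v ∧ v = f (a + i0) b := by
      by_cases h29 : a + i0 = 29
      · refine ⟨0, by simp only [fStep]; rw [if_pos h29], ?_⟩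
        rw [h29, f_29]
      · by_cases heq : a + i0 = b
        · refine ⟨1, by simp only [fStep]; rw [if_neg h29, if_pos heq], ?_⟩
          rw [heq]
          exact (f_self b (by omega)).symm
        · refine ⟨_, by simp only [fStep]; rw [if_neg h29, if_neg heq], ?_⟩
          have hx : a + i0 < b := by omega
          have e1 : D.getD (i0 + 1).toNat 0 = f (a + i0 + 1) b := by
            rw [hd (i0 + 1) (by omega) (by omega), if_pos (by omega),
                show a + (i0 + 1) = a + i0 + 1 by ring]
          have e3 : (if (a + i0) * 3 ≤ b then D.getD ((a + i0) * 3 - a).toNat 0 else 0)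
              = f ((a + i0) * 3) b := by
            split_ifs with h3
            · rw [hd ((a + i0) * 3 - a) (by omega) (by omega), if_pos (by omega),
                  show a + ((a + i0) * 3 - a) = (a + i0) * 3 by ring]
            · exact (f_gt _ b (by omega)).symm
          have e2 : (if (a + i0) * 2 ≤ b then D.getD ((a + i0) * 2 - a).toNat 0 else 0)
              = f ((a + i0) * 2) b := by
            split_ifs with h2
            · rw [hd ((a + i0) * 2 - a) (by omega) (by omega), if_pos (by omega),
                  show a + ((a + i0) * 2 - a) = (a + i0) * 2 by ring]
            · exact (f_gt _ b (by omega)).symm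
          rw [e1, e3, e2]
          exact (f_unfold (a + i0) b (by omega) hx h29).symm
    obtain ⟨v, hfs, hval⟩ := hstep
    rw [hfs]
    refine ⟨by rw [Array.size_setIfInBounds, hsz], ?_⟩
    intro j hj0 hj1
    rw [getD_setIfInBounds D i0.toNat v j.toNat hlt]
    by_cases hk : j = i0
    · rw [if_pos (by omega), hval, hk, if_pos (le_refl i0)]
    · rw [if_neg (by omega), hd j hj0 hj1]
      by_cases hxk : i0 ≤ j
      · rw [if_pos (by omega), if_pos hxk]
      · rw [if_neg (by omega), if_neg hxk]

-- ===== VERDICT (by name: the statement is the Claim_ definition above) =====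
theorem f_spec : Claim_equal_f := by
  intro a b _ hpre
  unfold Spec_f f_alt
  split_ifs with h29 heq hgt
  · subst h29; exact f_29 b
  · subst heq; exact f_self a h29
  · exact f_gt a b (by omega)
  · have ha : 1 ≤ a := by
      rcases hpre with h | h
      · exact h
      · omega
    have hab : a < b := by omega
    obtain ⟨_, hd⟩ := loop_inv a b ha hab (b - a + 1).toNat 0 (by omega) (by omega) (by omega)
    rw [show b - a + 1 - 1 = b - a by ring, show (0:Int) - 1 = -1 by ring] at *
    have h0 := hd 0 (le_refl 0) (by omega)
    rw [if_pos (le_refl (0:Int)), show a + 0 = a by ring,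
        show ((0:Int).toNat) = (0:Nat) from rfl] at h0
    exact h0.symm
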